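-- pv_equiv track=rewrite | github.com/BudarinPavel/algorithms | yan_algorithm_training_1/l7.py | min_cars_on_full_parking
-- ===== SOURCE A (Python) =====
-- def min_cars_on_full_parking(cars, n):
--     events = []
--     for i in range(len(cars)):
--         time_in, time_out, place_from, place_to = cars[i]
--         events.append((time_in, 1, place_to - place_from + 1, i))
--         events.append((time_out, -1, place_to - place_from + 1, i))
--     events.sort()
--
--     occupied = 0
--     now_cars = 0
--     min_cars = len(cars) + 1
--     for i in range(len(events)):
--         if events[i][1] == -1:
--             occupied -= events[i][2]
--             now_cars -= 1
--         elif events[i][1] == 1: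
--             occupied += events[i][2]
--             now_cars += 1
--         if occupied == n and now_cars < min_cars:
--             min_cars = now_cars
--
--     car_nums = set()
--     now_cars = 0
--     for i in range(len(events)):
--         if events[i][1] == -1:
--             occupied -= events[i][2]
--             now_cars -= 1
--             car_nums.remove(events[i][3])
--         elif events[i][1] == 1:
--             occupied += events[i][2]
--             now_cars += 1
--             car_nums.add(events[i][3])
--         if occupied == n and now_cars == min_cars:
--             return car_nums
--     return set()
-- ===== SOURCE B (Python) =====
-- def min_cars_on_full_parking(cars, n):
--     # Single sweep: keep a running snapshot of the best (minimal) moment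
--     # instead of A's two passes over the sorted events.
--     events = []
--     for i, (time_in, time_out, place_from, place_to) in enumerate(cars):
--         size = place_to - place_from + 1
--         events.append((time_in, 1, size, i))
--         events.append((time_out, -1, size, i))
--     events.sort()
--
--     occupied = 0
--     now_cars = 0
--     cur = set()
--     best_min = len(cars) + 1
--     best = set()
--     for _, typ, size, i in events:
--         if typ == -1:
--             occupied -= size
--             now_cars -= 1
--             cur.remove(i)
--         else:
--             occupied += size
--             now_cars += 1
--             cur.add(i)
--         if occupied == n and now_cars < best_min:
--             best_min = now_cars
--             best = set(cur)
--     return best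
-- ===== Notes on version B (the rewrite author's own statement) =====
-- stated objective: alternative
-- what changed: B replaces A's two sequential passes over the sorted events (first compute the global minimum, then rescan to find the first moment attaining it) by a single sweep that maintains a running minimum and snapshots the current car set whenever a strictly smaller minimum is reached with the parking full, defaulting to the empty set.
-- outside the precondition, e.g. on min_cars_on_full_parking([(0, 5, 1, 2), (9, 8, 1, 1)], 2): A returns {0}, B raises KeyError
import Mathlib
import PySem

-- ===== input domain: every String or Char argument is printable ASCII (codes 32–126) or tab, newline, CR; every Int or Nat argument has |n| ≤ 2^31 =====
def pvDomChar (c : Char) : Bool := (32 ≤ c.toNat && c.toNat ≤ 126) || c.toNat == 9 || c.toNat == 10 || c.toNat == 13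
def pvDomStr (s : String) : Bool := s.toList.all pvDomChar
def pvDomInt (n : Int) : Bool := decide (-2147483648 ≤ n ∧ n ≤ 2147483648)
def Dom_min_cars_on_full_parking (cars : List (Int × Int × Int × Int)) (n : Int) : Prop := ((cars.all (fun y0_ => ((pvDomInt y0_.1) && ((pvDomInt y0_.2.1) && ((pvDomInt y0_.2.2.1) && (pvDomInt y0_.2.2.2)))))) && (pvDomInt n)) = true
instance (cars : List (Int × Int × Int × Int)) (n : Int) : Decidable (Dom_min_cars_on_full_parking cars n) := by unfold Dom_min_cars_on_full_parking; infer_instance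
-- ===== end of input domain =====

-- B merges A's two passes over the sorted events into one sweep that snapshots the
-- running set whenever a new minimum is reached with the parking full (objective: alternative).
-- Python tuple comparison in events.sort() is lex on the Int components: key into Prod.Lex.
def pvKey4 (e : Int × Int × Int × Int) : Int ×ₗ (Int ×ₗ (Int ×ₗ Int)) :=
  toLex (e.1, toLex (e.2.1, toLex (e.2.2.1, e.2.2.2)))

-- ===== PORT A =====
-- for i in range(len(cars)): unpack cars[i]; append the two events (index always in range)
def pvEventsA (cars : List (Int × Int × Int × Int)) : List (Int × Int × Int × Int) :=
  (PySem.List.pyRange 0 (PySem.List.len cars)).foldl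
    (fun evs i =>
      evs ++ [((PySem.List.pyGetD cars i (0,0,0,0)).1, 1,
               (PySem.List.pyGetD cars i (0,0,0,0)).2.2.2 - (PySem.List.pyGetD cars i (0,0,0,0)).2.2.1 + 1, i),
              ((PySem.List.pyGetD cars i (0,0,0,0)).2.1, -1,
               (PySem.List.pyGetD cars i (0,0,0,0)).2.2.2 - (PySem.List.pyGetD cars i (0,0,0,0)).2.2.1 + 1, i)]) []

-- A's first loop: running minimum of now_cars over the instants with occupied == n
def pvMinLoop (n : Int) : List (Int × Int × Int × Int) → Int → Int → Int → Int
  | [], _, _, mc => mc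
  | e :: es, occ, nc, mc =>
      pvMinLoop n es
        (if e.2.1 = -1 then occ - e.2.2.1 else if e.2.1 = 1 then occ + e.2.2.1 else occ)
        (if e.2.1 = -1 then nc - 1 else if e.2.1 = 1 then nc + 1 else nc)
        (if (if e.2.1 = -1 then occ - e.2.2.1 else if e.2.1 = 1 then occ + e.2.2.1 else occ) = n ∧
            (if e.2.1 = -1 then nc - 1 else if e.2.1 = 1 then nc + 1 else nc) < mc
         then (if e.2.1 = -1 then nc - 1 else if e.2.1 = 1 then nc + 1 else nc) else mc)

-- A's second loop: returns car_nums at the first instant with occupied == n and now_cars == M.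
-- car_nums.remove: Set.remove? is none exactly where Python raises KeyError (excluded by Pre_); getD totalizes.
def pvScan (n M : Int) : List (Int × Int × Int × Int) → Int → Int → List Int → List Int
  | [], _, _, _ => []
  | e :: es, occ, nc, s =>
      if (if e.2.1 = -1 then occ - e.2.2.1 else if e.2.1 = 1 then occ + e.2.2.1 else occ) = n ∧
         (if e.2.1 = -1 then nc - 1 else if e.2.1 = 1 then nc + 1 else nc) = M
      then (if e.2.1 = -1 then ((PySem.Set.remove? s e.2.2.2).getD s)
            else if e.2.1 = 1 then PySem.Set.add s e.2.2.2 else s)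
      else pvScan n M es
        (if e.2.1 = -1 then occ - e.2.2.1 else if e.2.1 = 1 then occ + e.2.2.1 else occ)
        (if e.2.1 = -1 then nc - 1 else if e.2.1 = 1 then nc + 1 else nc)
        (if e.2.1 = -1 then ((PySem.Set.remove? s e.2.2.2).getD s)
         else if e.2.1 = 1 then PySem.Set.add s e.2.2.2 else s)

def min_cars_on_full_parking (cars : List (Int × Int × Int × Int)) (n : Int) : List Int :=
  let events := PySem.List.sorted (pvEventsA cars) pvKey4 false
  pvScan n (pvMinLoop n events 0 0 ((cars.length : Int) + 1)) events 0 0 PySem.Set.empty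

-- ===== PORT B =====
-- for i, (t_in, t_out, p_from, p_to) in enumerate(cars): append the two events
def pvEventsB (cars : List (Int × Int × Int × Int)) : List (Int × Int × Int × Int) :=
  (PySem.List.enumerate cars).foldl
    (fun evs p =>
      evs ++ [(p.2.1, 1, p.2.2.2.2 - p.2.2.2.1 + 1, p.1),
              (p.2.2.1, -1, p.2.2.2.2 - p.2.2.2.1 + 1, p.1)]) []

-- B's single sweep: cur.remove(i) totalized exactly as in A's port; best = cur.copy() is the same list value
def pvSweep (n : Int) : List (Int × Int × Int × Int) → Int → Int → List Int → Int → List Int → List Int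
  | [], _, _, _, _, best => best
  | e :: es, occ, nc, cur, bm, best =>
      if (if e.2.1 = -1 then occ - e.2.2.1 else occ + e.2.2.1) = n ∧
         (if e.2.1 = -1 then nc - 1 else nc + 1) < bm
      then pvSweep n es
        (if e.2.1 = -1 then occ - e.2.2.1 else occ + e.2.2.1)
        (if e.2.1 = -1 then nc - 1 else nc + 1)
        (if e.2.1 = -1 then ((PySem.Set.remove? cur e.2.2.2).getD cur) else PySem.Set.add cur e.2.2.2)
        (if e.2.1 = -1 then nc - 1 else nc + 1)
        (if e.2.1 = -1 then ((PySem.Set.remove? cur e.2.2.2).getD cur) else PySem.Set.add cur e.2.2.2)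
      else pvSweep n es
        (if e.2.1 = -1 then occ - e.2.2.1 else occ + e.2.2.1)
        (if e.2.1 = -1 then nc - 1 else nc + 1)
        (if e.2.1 = -1 then ((PySem.Set.remove? cur e.2.2.2).getD cur) else PySem.Set.add cur e.2.2.2)
        bm best

def min_cars_on_full_parking_alt (cars : List (Int × Int × Int × Int)) (n : Int) : List Int :=
  let events := PySem.List.sorted (pvEventsB cars) pvKey4 false
  pvSweep n events 0 0 PySem.Set.empty ((cars.length : Int) + 1) PySem.Set.empty

-- ===== PRECONDITION & SPEC =====
-- Pre_ excludes inputs where some car has time_out ≤ time_in: there its departure event sorts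
-- before its arrival and Python's car_nums.remove raises KeyError, except on rare inputs where
-- A's second loop returns before reaching that event while B (one full sweep) still raises.
def Pre_min_cars_on_full_parking (cars : List (Int × Int × Int × Int)) (n : Int) : Prop :=
  ∀ c ∈ cars, c.1 < c.2.1
instance (cars : List (Int × Int × Int × Int)) (n : Int) : Decidable (Pre_min_cars_on_full_parking cars n) := by unfold Pre_min_cars_on_full_parking; infer_instance
def pvWitness_min_cars_on_full_parking : (List (Int × Int × Int × Int)) × Int := ([(0, 2, 0, 1), (1, 3, 2, 2)], 3)
def Spec_min_cars_on_full_parking (cars : List (Int × Int × Int × Int)) (n : Int) (out : List Int) : Prop := out = min_cars_on_full_parking_alt cars n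
instance (cars : List (Int × Int × Int × Int)) (n : Int) (out : List Int) : Decidable (Spec_min_cars_on_full_parking cars n out) := by unfold Spec_min_cars_on_full_parking; infer_instance

-- ===== CLAIM (what is proved, stated in full; the proofs are below) =====
def Claim_equal_min_cars_on_full_parking : Prop := ∀ (cars : List (Int × Int × Int × Int)) (n : Int), Dom_min_cars_on_full_parking cars n → Pre_min_cars_on_full_parking cars n → Spec_min_cars_on_full_parking cars n (min_cars_on_full_parking cars n)

-- ===== LEMMAS AND PROOFS =====

-- the running minimum never increases
lemma pvMinLoop_le (n : Int) (es : List (Int × Int × Int × Int)) :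
    ∀ (occ nc mc : Int), pvMinLoop n es occ nc mc ≤ mc := by
  induction es with
  | nil => intro occ nc mc; simp [pvMinLoop]
  | cons e es ih =>
      intro occ nc mc
      simp only [pvMinLoop]
      split_ifs <;>
        first
          | exact ih _ _ _
          | (rename_i hcond; exact le_trans (ih _ _ _) (le_of_lt hcond.2))

-- if now_cars can never reach M (counting the remaining arrival events), A's second loop returns set()
lemma pvScan_none (n M : Int) (es : List (Int × Int × Int × Int)) :
    ∀ (occ nc : Int) (s : List Int),
      nc + ((es.countP (fun e => decide (e.2.1 = 1)) : Nat) : Int) < M →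
      pvScan n M es occ nc s = [] := by
  induction es with
  | nil => intro occ nc s _; simp [pvScan]
  | cons e es ih =>
      intro occ nc s h
      rw [List.countP_cons] at h
      have hpos : (0 : Int) ≤ ((es.countP (fun e => decide (e.2.1 = 1)) : Nat) : Int) := by positivity
      have hnc' : (if e.2.1 = -1 then nc - 1 else if e.2.1 = 1 then nc + 1 else nc)
          + ((es.countP (fun e => decide (e.2.1 = 1)) : Nat) : Int) < M := by
        split_ifs with h1 h2
        · simp [h1] at h; omega
        · simp [h2] at h; omega
        · simp [h2] at h; omega
      have hne : ¬ ((if e.2.1 = -1 then occ - e.2.2.1 else if e.2.1 = 1 then occ + e.2.2.1 else occ) = n ∧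
          (if e.2.1 = -1 then nc - 1 else if e.2.1 = 1 then nc + 1 else nc) = M) := by
        intro hc
        omega
      simp only [pvScan, if_neg hne]
      exact ih _ _ _ hnc'

-- one step of the single sweep against (minimum-so-far, first snapshot attaining it)
lemma pvStep (n : Int) (es : List (Int × Int × Int × Int))
    (hih : ∀ (occ nc : Int) (s : List Int) (bm : Int) (bs : List Int),
      pvSweep n es occ nc s bm bs =
        if pvMinLoop n es occ nc bm < bm then pvScan n (pvMinLoop n es occ nc bm) es occ nc s else bs)
    (A C : Int) (s' : List Int) (bm : Int) (bs : List Int) :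
    (if A = n ∧ C < bm then pvSweep n es A C s' C s' else pvSweep n es A C s' bm bs)
      = if pvMinLoop n es A C (if A = n ∧ C < bm then C else bm) < bm
        then (if A = n ∧ C = pvMinLoop n es A C (if A = n ∧ C < bm then C else bm) then s'
              else pvScan n (pvMinLoop n es A C (if A = n ∧ C < bm then C else bm)) es A C s')
        else bs := by
  by_cases hc : A = n ∧ C < bm
  · rw [if_pos hc, if_pos hc, hih]
    have hle := pvMinLoop_le n es A C C
    by_cases h2 : pvMinLoop n es A C C < C
    · rw [if_pos h2, if_pos (lt_trans h2 hc.2), if_neg (by omega)]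
    · have hM : pvMinLoop n es A C C = C := by omega
      rw [if_neg h2, hM, if_pos hc.2, if_pos ⟨hc.1, rfl⟩]
  · rw [if_neg hc, if_neg hc, hih]
    by_cases h2 : pvMinLoop n es A C bm < bm
    · rw [if_pos h2, if_pos h2, if_neg (by intro hcm; exact hc ⟨hcm.1, by omega⟩)]
    · rw [if_neg h2, if_neg h2]

-- the single sweep equals: find the final minimum, then return the first snapshot attaining it
lemma pvSweep_eq (n : Int) (es : List (Int × Int × Int × Int))
    (h : ∀ e ∈ es, e.2.1 = -1 ∨ e.2.1 = 1) :
    ∀ (occ nc : Int) (s : List Int) (bm : Int) (bs : List Int),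
      pvSweep n es occ nc s bm bs =
        if pvMinLoop n es occ nc bm < bm then pvScan n (pvMinLoop n es occ nc bm) es occ nc s else bs := by
  induction es with
  | nil => intro occ nc s bm bs; simp [pvSweep, pvMinLoop]
  | cons e es ih =>
      intro occ nc s bm bs
      have hes : ∀ x ∈ es, x.2.1 = -1 ∨ x.2.1 = 1 := fun x hx => h x (List.mem_cons_of_mem _ hx)
      have hih := ih hes
      rcases h e (List.mem_cons_self) with h1 | h1 <;>
        · simp only [pvSweep, pvMinLoop, pvScan, h1, reduceIte]
          exact pvStep n es hih _ _ _ _ _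

-- both event constructions build the same list
lemma pvEvents_eq (cars : List (Int × Int × Int × Int)) : pvEventsB cars = pvEventsA cars := by
  unfold pvEventsB pvEventsA
  rw [PySem.List.enumerate_eq_map_pyRange cars (0,0,0,0), List.foldl_map]

-- every event has type -1 or 1
lemma pvEvents_types (cars : List (Int × Int × Int × Int)) :
    ∀ e ∈ pvEventsA cars, e.2.1 = -1 ∨ e.2.1 = 1 := by
  intro e he
  rw [pvEventsA, PySem.List.foldl_append_eq_flatMap, List.nil_append, List.mem_flatMap] at he
  obtain ⟨i, _, hmem⟩ := he
  simp only [List.mem_cons, List.not_mem_nil, or_false] at hmem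
  rcases hmem with h | h <;> subst h <;> simp

-- exactly len(cars) arrival events
lemma pvEvents_count (cars : List (Int × Int × Int × Int)) :
    ((pvEventsA cars).countP (fun e => decide (e.2.1 = 1)) : Int) = cars.length := by
  rw [pvEventsA, PySem.List.foldl_append_eq_flatMap, List.nil_append]
  have hgen : ∀ l : List Int,
      ((l.flatMap (fun i =>
        [((PySem.List.pyGetD cars i (0,0,0,0)).1, (1:Int),
          (PySem.List.pyGetD cars i (0,0,0,0)).2.2.2 - (PySem.List.pyGetD cars i (0,0,0,0)).2.2.1 + 1, i),
         ((PySem.List.pyGetD cars i (0,0,0,0)).2.1, (-1:Int),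
          (PySem.List.pyGetD cars i (0,0,0,0)).2.2.2 - (PySem.List.pyGetD cars i (0,0,0,0)).2.2.1 + 1, i)])).countP
        (fun e => decide (e.2.1 = 1))) = l.length := by
    intro l
    induction l with
    | nil => rfl
    | cons x xs ihx => simp [ihx]
  rw [hgen]
  rw [PySem.List.length_pyRange_one]
  simp [PySem.List.len]

-- ===== VERDICT (by name: the statement is the Claim_ definition above) =====
theorem min_cars_on_full_parking_spec : Claim_equal_min_cars_on_full_parking := by
  intro cars n _ _
  show min_cars_on_full_parking cars n = min_cars_on_full_parking_alt cars n
  unfold min_cars_on_full_parking min_cars_on_full_parking_alt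
  rw [pvEvents_eq]
  have htypes : ∀ e ∈ PySem.List.sorted (pvEventsA cars) pvKey4 false, e.2.1 = -1 ∨ e.2.1 = 1 := by
    intro e he
    rw [PySem.List.mem_sorted] at he
    exact pvEvents_types cars e he
  rw [pvSweep_eq n _ htypes]
  by_cases h2 : pvMinLoop n (PySem.List.sorted (pvEventsA cars) pvKey4 false) 0 0 ((cars.length : Int) + 1)
      < (cars.length : Int) + 1
  · rw [if_pos h2]
  · rw [if_neg h2]
    have hle := pvMinLoop_le n (PySem.List.sorted (pvEventsA cars) pvKey4 false) 0 0 ((cars.length : Int) + 1)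
    have hM : pvMinLoop n (PySem.List.sorted (pvEventsA cars) pvKey4 false) 0 0 ((cars.length : Int) + 1)
        = (cars.length : Int) + 1 := by omega
    have hcnt : (((PySem.List.sorted (pvEventsA cars) pvKey4 false).countP
        (fun e => decide (e.2.1 = 1)) : Nat) : Int) = cars.length := by
      rw [(PySem.List.sorted_perm (pvEventsA cars) pvKey4 false).countP_eq]
      exact pvEvents_count cars
    rw [pvScan_none n _ _ 0 0 PySem.Set.empty (by rw [hcnt, hM]; omega)]
    rfl
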